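-- pv_equiv track=rewrite | github.com/bilfor/nand | projects/11/compiler/tokenizer.py | simple_tokenize
-- ===== SOURCE A (Python) =====
-- def simple_tokenize(s):
--     words_and_chars = []
--     word = ''
--     for char in s:
--         if char.isalpha():
--             word += char
--         else:
--             if word:
--                 words_and_chars.append(word)
--                 word = ''
--             if char != ' ':
--                 words_and_chars.append(char)
--     if word:
--         words_and_chars.append(word)
--
--     return words_and_chars
-- ===== SOURCE B (Python) =====
-- from itertools import groupby
--
-- def simple_tokenize(s):
--     tokens = []
--     for is_word, group in groupby(s, key=str.isalpha):
--         if is_word: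
--             tokens.append(''.join(group))
--         else:
--             tokens.extend(c for c in group if c != ' ')
--     return tokens
-- ===== Notes on version B (the rewrite author's own statement) =====
-- stated objective: idiomatic
-- what changed: Replaces the char-by-char buffer/flush state machine with itertools.groupby runs keyed on str.isalpha: each alphabetic run is joined into one word token, each non-alphabetic run contributes its non-space characters.
import Mathlib
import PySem

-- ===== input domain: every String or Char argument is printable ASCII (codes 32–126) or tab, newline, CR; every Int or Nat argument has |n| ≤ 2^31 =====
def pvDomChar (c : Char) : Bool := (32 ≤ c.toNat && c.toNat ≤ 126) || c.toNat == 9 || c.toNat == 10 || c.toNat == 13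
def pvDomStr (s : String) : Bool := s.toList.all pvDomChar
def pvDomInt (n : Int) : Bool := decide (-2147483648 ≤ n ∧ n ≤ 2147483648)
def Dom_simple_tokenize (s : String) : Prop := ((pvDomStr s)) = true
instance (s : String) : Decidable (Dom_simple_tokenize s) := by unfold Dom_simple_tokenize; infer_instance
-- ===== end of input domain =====

-- B replaces A's char-by-char buffer/flush state machine with a run-based (groupby-style) traversal; objective: idiomatic, same cost.

-- ===== PORT A =====
-- A's loop: fold over the characters carrying (words_and_chars, word); flush word on a non-alpha char, skip spaces, flush at the end.
def simple_tokenize (s : String) : List String :=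
  let st := s.toList.foldl (fun (st : List String × List Char) c =>
    if PySem.Chars.isalpha c then (st.1, st.2 ++ [c])
    else
      let out := if st.2 ≠ [] then st.1 ++ [String.ofList st.2] else st.1
      if c ≠ ' ' then (out ++ [String.ofList [c]], []) else (out, [])) ([], [])
  if st.2 ≠ [] then st.1 ++ [String.ofList st.2] else st.1

-- ===== PORT B =====
-- B's groupby: peel off a maximal alphabetic run as one word token, otherwise emit the single non-space char.
def simple_tokenize_altGo : List Char → List String
  | [] => []
  | c :: rest =>
    if PySem.Chars.isalpha c then
      String.ofList (c :: rest.takeWhile PySem.Chars.isalpha) ::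
        simple_tokenize_altGo (rest.dropWhile PySem.Chars.isalpha)
    else if c ≠ ' ' then
      String.ofList [c] :: simple_tokenize_altGo rest
    else
      simple_tokenize_altGo rest
termination_by cs => cs.length
decreasing_by
  · exact Nat.lt_succ_of_le (List.length_dropWhile_le _ _)
  · simp
  · simp

def simple_tokenize_alt (s : String) : List String := simple_tokenize_altGo s.toList

-- ===== PRECONDITION & SPEC =====
def Spec_simple_tokenize (s : String) (out : List String) : Prop := out = simple_tokenize_alt s
instance (s : String) (out : List String) : Decidable (Spec_simple_tokenize s out) := by unfold Spec_simple_tokenize; infer_instance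

-- ===== CLAIM (what is proved, stated in full; the proofs are below) =====
def Claim_equal_simple_tokenize : Prop := ∀ (s : String), Dom_simple_tokenize s → Spec_simple_tokenize s (simple_tokenize s)

-- ===== LEMMAS AND PROOFS =====

-- all-alpha run followed by a non-alpha char: takeWhile / dropWhile split exactly at the boundary
theorem pv_takeWhile_run (w : List Char) (c : Char) (cs : List Char)
    (hw : ∀ a ∈ w, PySem.Chars.isalpha a = true) (hc : PySem.Chars.isalpha c = false) :
    (w ++ c :: cs).takeWhile PySem.Chars.isalpha = w ∧
    (w ++ c :: cs).dropWhile PySem.Chars.isalpha = c :: cs := by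
  induction w with
  | nil => simp [hc]
  | cons a t ih =>
    have ha := hw a (by simp)
    have ht := ih (fun x hx => hw x (by simp [hx]))
    simp [ha, ht.1, ht.2]

-- altGo on a pure alphabetic run is the single word (or nothing)
theorem pv_altGo_alpha (w : List Char) (hw : ∀ a ∈ w, PySem.Chars.isalpha a = true) :
    simple_tokenize_altGo w = if w ≠ [] then [String.ofList w] else [] := by
  cases w with
  | nil => simp [simple_tokenize_altGo]
  | cons a t =>
    have ha := hw a (by simp)
    have ht : ∀ x ∈ t, PySem.Chars.isalpha x = true := fun x hx => hw x (by simp [hx])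
    have htw : t.takeWhile PySem.Chars.isalpha = t := List.takeWhile_eq_self_iff.mpr ht
    have hdw : t.dropWhile PySem.Chars.isalpha = [] := List.dropWhile_eq_nil_iff.mpr ht
    simp [simple_tokenize_altGo, ha, htw, hdw]

-- altGo across a run boundary: emit the pending word, then the non-alpha char (unless a space)
theorem pv_altGo_break (w : List Char) (c : Char) (cs : List Char)
    (hw : ∀ a ∈ w, PySem.Chars.isalpha a = true) (hc : PySem.Chars.isalpha c = false) :
    simple_tokenize_altGo (w ++ c :: cs) =
      (if w ≠ [] then [String.ofList w] else []) ++
      (if c ≠ ' ' then [String.ofList [c]] else []) ++ simple_tokenize_altGo cs := by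
  have hstep : simple_tokenize_altGo (c :: cs) =
      (if c ≠ ' ' then [String.ofList [c]] else []) ++ simple_tokenize_altGo cs := by
    by_cases h : c = ' '
    · subst h; simp [simple_tokenize_altGo, hc]
    · simp [simple_tokenize_altGo, hc, h]
  cases w with
  | nil => simpa using hstep
  | cons a t =>
    have ha := hw a (by simp)
    obtain ⟨h1, h2⟩ := pv_takeWhile_run (a :: t) c cs hw hc
    rw [List.cons_append, simple_tokenize_altGo]
    simp only [List.cons_append] at h1 h2 ⊢
    rw [if_pos ha]
    cases h1c : (t ++ c :: cs).takeWhile PySem.Chars.isalpha <;>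
      simp_all

-- loop invariant: A's fold with pending word w and output out equals out ++ altGo (w ++ rest)
theorem pv_key (cs : List Char) :
    ∀ (w : List Char) (out : List String), (∀ a ∈ w, PySem.Chars.isalpha a = true) →
    (let st := cs.foldl (fun (st : List String × List Char) c =>
        if PySem.Chars.isalpha c then (st.1, st.2 ++ [c])
        else
          let o := if st.2 ≠ [] then st.1 ++ [String.ofList st.2] else st.1
          if c ≠ ' ' then (o ++ [String.ofList [c]], []) else (o, [])) (out, w)
     if st.2 ≠ [] then st.1 ++ [String.ofList st.2] else st.1) =
    out ++ simple_tokenize_altGo (w ++ cs) := by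
  induction cs with
  | nil =>
    intro w out hw
    simp only [List.foldl_nil, List.append_nil, pv_altGo_alpha w hw]
    by_cases h : w = [] <;> simp [h]
  | cons c rest ih =>
    intro w out hw
    by_cases hc : PySem.Chars.isalpha c = true
    · have := ih (w ++ [c]) out (by
        intro a ha
        rcases List.mem_append.mp ha with h | h
        · exact hw a h
        · simp at h; simpa [h] using hc)
      simpa [List.foldl_cons, hc, List.append_assoc] using this
    · have hcf : PySem.Chars.isalpha c = false := by simpa using hc
      have hbr := pv_altGo_break w c rest hw hcf
      have := ih [] ((if w ≠ [] then out ++ [String.ofList w] else out) ++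
          (if c ≠ ' ' then [String.ofList [c]] else [])) (by simp)
      by_cases hsp : c = ' ' <;>
        simp only [List.foldl_cons, hcf, hsp] <;>
        by_cases hwn : w = [] <;>
        simp_all [List.append_assoc]

-- ===== VERDICT (by name: the statement is the Claim_ definition above) =====
theorem simple_tokenize_spec : Claim_equal_simple_tokenize := by
  intro s _
  show simple_tokenize s = simple_tokenize_alt s
  have := pv_key s.toList [] [] (by simp)
  simpa [simple_tokenize, simple_tokenize_alt] using this
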